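-- pv_equiv track=rewrite | github.com/alantlwu/evcostcom | app.py | get_gasoline_tax_and_fuel
-- ===== SOURCE A (Python) =====
-- def get_gasoline_tax_and_fuel(cc):
--     tax_table = [
--         (500, 1620, 2160),
--         (600, 2160, 2880),
--         (1200, 4320, 4320),
--         (1800, 7120, 4800),
--         (2400, 11230, 6180),
--         (3000, 15210, 7200),
--         (3600, 28220, 8640),
--         (4200, 28220, 9810),
--         (4800, 46170, 11220),
--         (5400, 46170, 12180),
--         (6000, 69690, 13080),
--         (6600, 69690, 13950),
--         (7200, 111700, 14910),
--         (7800, 111700, 15720),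
--         (float('inf'), 151200, 15720),
--     ]
--     for limit, tax, fuel_fee in tax_table:
--         if cc <= limit:
--             return tax, fuel_fee, tax + fuel_fee
-- ===== SOURCE B (Python) =====
-- # Table lookup by binary search over the sorted boundary list instead of a linear scan.
-- _LIMITS = [500, 600, 1200, 1800, 2400, 3000, 3600, 4200, 4800, 5400, 6000, 6600, 7200, 7800]
-- _ROWS = [
--     (1620, 2160), (2160, 2880), (4320, 4320), (7120, 4800), (11230, 6180),
--     (15210, 7200), (28220, 8640), (28220, 9810), (46170, 11220), (46170, 12180),
--     (69690, 13080), (69690, 13950), (111700, 14910), (111700, 15720), (151200, 15720),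
-- ]
--
-- def get_gasoline_tax_and_fuel(cc):
--     # bisect_left over the boundaries: first index whose limit >= cc
--     lo, hi = 0, len(_LIMITS)
--     while lo < hi:
--         mid = (lo + hi) // 2
--         if _LIMITS[mid] < cc:
--             lo = mid + 1
--         else:
--             hi = mid
--     tax, fuel_fee = _ROWS[lo]
--     return tax, fuel_fee, tax + fuel_fee
-- ===== Notes on version B (the rewrite author's own statement) =====
-- stated objective: idiomatic
-- what changed: Replaced the per-row linear scan of inlined (limit, tax, fee) tuples by a bisect_left-style binary search over a separate sorted boundary list paired with a parallel row table.
import Mathlib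
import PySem

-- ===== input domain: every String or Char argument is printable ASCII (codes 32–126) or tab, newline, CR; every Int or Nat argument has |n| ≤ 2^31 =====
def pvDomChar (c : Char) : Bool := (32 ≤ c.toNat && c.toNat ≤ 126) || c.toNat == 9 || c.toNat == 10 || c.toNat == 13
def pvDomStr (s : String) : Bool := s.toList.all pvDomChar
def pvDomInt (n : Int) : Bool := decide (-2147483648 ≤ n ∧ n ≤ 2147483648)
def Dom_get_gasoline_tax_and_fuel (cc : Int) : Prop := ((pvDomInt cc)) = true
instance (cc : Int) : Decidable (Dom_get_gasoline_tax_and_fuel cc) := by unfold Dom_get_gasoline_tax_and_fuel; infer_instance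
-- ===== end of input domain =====

-- B replaces A's linear scan of the inlined tax table by a bisect_left-style binary search
-- over a separate sorted boundary list with a parallel row table (idiomatic lookup pattern).


-- ===== PORT A =====
-- A iterates the table in order and returns at the first row with cc <= limit; the last
-- row's limit is float('inf'), so it always matches.  The loop over the literal table is
-- transliterated as the chain of its row tests in the same order.
def get_gasoline_tax_and_fuel (cc : Int) : Int × Int × Int :=
  if cc ≤ 500 then (1620, 2160, 1620 + 2160)
  else if cc ≤ 600 then (2160, 2880, 2160 + 2880)
  else if cc ≤ 1200 then (4320, 4320, 4320 + 4320)
  else if cc ≤ 1800 then (7120, 4800, 7120 + 4800)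
  else if cc ≤ 2400 then (11230, 6180, 11230 + 6180)
  else if cc ≤ 3000 then (15210, 7200, 15210 + 7200)
  else if cc ≤ 3600 then (28220, 8640, 28220 + 8640)
  else if cc ≤ 4200 then (28220, 9810, 28220 + 9810)
  else if cc ≤ 4800 then (46170, 11220, 46170 + 11220)
  else if cc ≤ 5400 then (46170, 12180, 46170 + 12180)
  else if cc ≤ 6000 then (69690, 13080, 69690 + 13080)
  else if cc ≤ 6600 then (69690, 13950, 69690 + 13950)
  else if cc ≤ 7200 then (111700, 14910, 111700 + 14910)
  else if cc ≤ 7800 then (111700, 15720, 111700 + 15720)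
  else (151200, 15720, 151200 + 15720)

-- ===== PORT B =====
def pvLimits : List Int := [500, 600, 1200, 1800, 2400, 3000, 3600, 4200, 4800, 5400, 6000, 6600, 7200, 7800]
def pvRows : List (Int × Int) :=
  [(1620, 2160), (2160, 2880), (4320, 4320), (7120, 4800), (11230, 6180),
   (15210, 7200), (28220, 8640), (28220, 9810), (46170, 11220), (46170, 12180),
   (69690, 13080), (69690, 13950), (111700, 14910), (111700, 15720), (151200, 15720)]

-- Source B's hand-written bisect_left while-loop; indices stay in range, so getD is exact here.
def pvBisect (cc : Int) (lo hi : Nat) : Nat :=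
  if lo < hi then
    let mid := (lo + hi) / 2
    if pvLimits.getD mid 0 < cc then pvBisect cc (mid + 1) hi else pvBisect cc lo mid
  else lo
termination_by hi - lo
decreasing_by all_goals omega

def get_gasoline_tax_and_fuel_alt (cc : Int) : Int × Int × Int :=
  let i := pvBisect cc 0 pvLimits.length
  let r := pvRows.getD i (0, 0)
  (r.1, r.2, r.1 + r.2)

-- ===== PRECONDITION & SPEC =====
def Spec_get_gasoline_tax_and_fuel (cc : Int) (out : Int × Int × Int) : Prop := out = get_gasoline_tax_and_fuel_alt cc
instance (cc : Int) (out : Int × Int × Int) : Decidable (Spec_get_gasoline_tax_and_fuel cc out) := by unfold Spec_get_gasoline_tax_and_fuel; infer_instance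

-- ===== CLAIM (what is proved, stated in full; the proofs are below) =====
def Claim_equal_get_gasoline_tax_and_fuel : Prop := ∀ (cc : Int), Dom_get_gasoline_tax_and_fuel cc → Spec_get_gasoline_tax_and_fuel cc (get_gasoline_tax_and_fuel cc)

-- ===== LEMMAS AND PROOFS =====
-- One unfolding step of the binary-search loop (concrete lo/hi are discharged by simp/omega).
theorem pvBisect_step (cc : Int) (lo hi : Nat) (h : lo < hi) :
    pvBisect cc lo hi =
      if pvLimits.getD ((lo + hi) / 2) 0 < cc then pvBisect cc ((lo + hi) / 2 + 1) hi
      else pvBisect cc lo ((lo + hi) / 2) := by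
  rw [pvBisect]; simp [h]

theorem pvBisect_stop (cc : Int) (lo : Nat) : pvBisect cc lo lo = lo := by
  rw [pvBisect]; simp

-- ===== VERDICT (by name: the statement is the Claim_ definition above) =====
set_option maxHeartbeats 1600000 in
theorem get_gasoline_tax_and_fuel_spec : Claim_equal_get_gasoline_tax_and_fuel := by
  intro cc _
  unfold Spec_get_gasoline_tax_and_fuel
  by_cases h1 : cc ≤ 500
  · have hb : pvBisect cc 0 14 = 0 := by
        rw [pvBisect_step _ _ _ (by omega)]
        rw [if_neg (show ¬ pvLimits.getD _ 0 < cc by norm_num [pvLimits]; omega)]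
        rw [pvBisect_step _ _ _ (by omega)]
        rw [if_neg (show ¬ pvLimits.getD _ 0 < cc by norm_num [pvLimits]; omega)]
        rw [pvBisect_step _ _ _ (by omega)]
        rw [if_neg (show ¬ pvLimits.getD _ 0 < cc by norm_num [pvLimits]; omega)]
        rw [pvBisect_step _ _ _ (by omega)]
        rw [if_neg (show ¬ pvLimits.getD _ 0 < cc by norm_num [pvLimits]; omega)]
        exact pvBisect_stop cc _
    simp only [get_gasoline_tax_and_fuel, get_gasoline_tax_and_fuel_alt,
        show pvLimits.length = 14 from rfl, hb]
    simp [pvRows, h1]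
  by_cases h2 : cc ≤ 600
  · have hb : pvBisect cc 0 14 = 1 := by
        rw [pvBisect_step _ _ _ (by omega)]
        rw [if_neg (show ¬ pvLimits.getD _ 0 < cc by norm_num [pvLimits]; omega)]
        rw [pvBisect_step _ _ _ (by omega)]
        rw [if_neg (show ¬ pvLimits.getD _ 0 < cc by norm_num [pvLimits]; omega)]
        rw [pvBisect_step _ _ _ (by omega)]
        rw [if_neg (show ¬ pvLimits.getD _ 0 < cc by norm_num [pvLimits]; omega)]
        rw [pvBisect_step _ _ _ (by omega)]
        rw [if_pos (show pvLimits.getD _ 0 < cc by norm_num [pvLimits]; omega)]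
        exact pvBisect_stop cc _
    simp only [get_gasoline_tax_and_fuel, get_gasoline_tax_and_fuel_alt,
        show pvLimits.length = 14 from rfl, hb]
    simp [pvRows, h1, h2]
  by_cases h3 : cc ≤ 1200
  · have hb : pvBisect cc 0 14 = 2 := by
        rw [pvBisect_step _ _ _ (by omega)]
        rw [if_neg (show ¬ pvLimits.getD _ 0 < cc by norm_num [pvLimits]; omega)]
        rw [pvBisect_step _ _ _ (by omega)]
        rw [if_neg (show ¬ pvLimits.getD _ 0 < cc by norm_num [pvLimits]; omega)]
        rw [pvBisect_step _ _ _ (by omega)]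
        rw [if_pos (show pvLimits.getD _ 0 < cc by norm_num [pvLimits]; omega)]
        rw [pvBisect_step _ _ _ (by omega)]
        rw [if_neg (show ¬ pvLimits.getD _ 0 < cc by norm_num [pvLimits]; omega)]
        exact pvBisect_stop cc _
    simp only [get_gasoline_tax_and_fuel, get_gasoline_tax_and_fuel_alt,
        show pvLimits.length = 14 from rfl, hb]
    simp [pvRows, h1, h2, h3]
  by_cases h4 : cc ≤ 1800
  · have hb : pvBisect cc 0 14 = 3 := by
        rw [pvBisect_step _ _ _ (by omega)]
        rw [if_neg (show ¬ pvLimits.getD _ 0 < cc by norm_num [pvLimits]; omega)]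
        rw [pvBisect_step _ _ _ (by omega)]
        rw [if_neg (show ¬ pvLimits.getD _ 0 < cc by norm_num [pvLimits]; omega)]
        rw [pvBisect_step _ _ _ (by omega)]
        rw [if_pos (show pvLimits.getD _ 0 < cc by norm_num [pvLimits]; omega)]
        rw [pvBisect_step _ _ _ (by omega)]
        rw [if_pos (show pvLimits.getD _ 0 < cc by norm_num [pvLimits]; omega)]
        exact pvBisect_stop cc _
    simp only [get_gasoline_tax_and_fuel, get_gasoline_tax_and_fuel_alt,
        show pvLimits.length = 14 from rfl, hb]
    simp [pvRows, h1, h2, h3, h4]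
  by_cases h5 : cc ≤ 2400
  · have hb : pvBisect cc 0 14 = 4 := by
        rw [pvBisect_step _ _ _ (by omega)]
        rw [if_neg (show ¬ pvLimits.getD _ 0 < cc by norm_num [pvLimits]; omega)]
        rw [pvBisect_step _ _ _ (by omega)]
        rw [if_pos (show pvLimits.getD _ 0 < cc by norm_num [pvLimits]; omega)]
        rw [pvBisect_step _ _ _ (by omega)]
        rw [if_neg (show ¬ pvLimits.getD _ 0 < cc by norm_num [pvLimits]; omega)]
        rw [pvBisect_step _ _ _ (by omega)]
        rw [if_neg (show ¬ pvLimits.getD _ 0 < cc by norm_num [pvLimits]; omega)]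
        exact pvBisect_stop cc _
    simp only [get_gasoline_tax_and_fuel, get_gasoline_tax_and_fuel_alt,
        show pvLimits.length = 14 from rfl, hb]
    simp [pvRows, h1, h2, h3, h4, h5]
  by_cases h6 : cc ≤ 3000
  · have hb : pvBisect cc 0 14 = 5 := by
        rw [pvBisect_step _ _ _ (by omega)]
        rw [if_neg (show ¬ pvLimits.getD _ 0 < cc by norm_num [pvLimits]; omega)]
        rw [pvBisect_step _ _ _ (by omega)]
        rw [if_pos (show pvLimits.getD _ 0 < cc by norm_num [pvLimits]; omega)]
        rw [pvBisect_step _ _ _ (by omega)]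
        rw [if_neg (show ¬ pvLimits.getD _ 0 < cc by norm_num [pvLimits]; omega)]
        rw [pvBisect_step _ _ _ (by omega)]
        rw [if_pos (show pvLimits.getD _ 0 < cc by norm_num [pvLimits]; omega)]
        exact pvBisect_stop cc _
    simp only [get_gasoline_tax_and_fuel, get_gasoline_tax_and_fuel_alt,
        show pvLimits.length = 14 from rfl, hb]
    simp [pvRows, h1, h2, h3, h4, h5, h6]
  by_cases h7 : cc ≤ 3600
  · have hb : pvBisect cc 0 14 = 6 := by
        rw [pvBisect_step _ _ _ (by omega)]
        rw [if_neg (show ¬ pvLimits.getD _ 0 < cc by norm_num [pvLimits]; omega)]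
        rw [pvBisect_step _ _ _ (by omega)]
        rw [if_pos (show pvLimits.getD _ 0 < cc by norm_num [pvLimits]; omega)]
        rw [pvBisect_step _ _ _ (by omega)]
        rw [if_pos (show pvLimits.getD _ 0 < cc by norm_num [pvLimits]; omega)]
        rw [pvBisect_step _ _ _ (by omega)]
        rw [if_neg (show ¬ pvLimits.getD _ 0 < cc by norm_num [pvLimits]; omega)]
        exact pvBisect_stop cc _
    simp only [get_gasoline_tax_and_fuel, get_gasoline_tax_and_fuel_alt,
        show pvLimits.length = 14 from rfl, hb]
    simp [pvRows, h1, h2, h3, h4, h5, h6, h7]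
  by_cases h8 : cc ≤ 4200
  · have hb : pvBisect cc 0 14 = 7 := by
        rw [pvBisect_step _ _ _ (by omega)]
        rw [if_neg (show ¬ pvLimits.getD _ 0 < cc by norm_num [pvLimits]; omega)]
        rw [pvBisect_step _ _ _ (by omega)]
        rw [if_pos (show pvLimits.getD _ 0 < cc by norm_num [pvLimits]; omega)]
        rw [pvBisect_step _ _ _ (by omega)]
        rw [if_pos (show pvLimits.getD _ 0 < cc by norm_num [pvLimits]; omega)]
        rw [pvBisect_step _ _ _ (by omega)]
        rw [if_pos (show pvLimits.getD _ 0 < cc by norm_num [pvLimits]; omega)]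
        exact pvBisect_stop cc _
    simp only [get_gasoline_tax_and_fuel, get_gasoline_tax_and_fuel_alt,
        show pvLimits.length = 14 from rfl, hb]
    simp [pvRows, h1, h2, h3, h4, h5, h6, h7, h8]
  by_cases h9 : cc ≤ 4800
  · have hb : pvBisect cc 0 14 = 8 := by
        rw [pvBisect_step _ _ _ (by omega)]
        rw [if_pos (show pvLimits.getD _ 0 < cc by norm_num [pvLimits]; omega)]
        rw [pvBisect_step _ _ _ (by omega)]
        rw [if_neg (show ¬ pvLimits.getD _ 0 < cc by norm_num [pvLimits]; omega)]
        rw [pvBisect_step _ _ _ (by omega)]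
        rw [if_neg (show ¬ pvLimits.getD _ 0 < cc by norm_num [pvLimits]; omega)]
        rw [pvBisect_step _ _ _ (by omega)]
        rw [if_neg (show ¬ pvLimits.getD _ 0 < cc by norm_num [pvLimits]; omega)]
        exact pvBisect_stop cc _
    simp only [get_gasoline_tax_and_fuel, get_gasoline_tax_and_fuel_alt,
        show pvLimits.length = 14 from rfl, hb]
    simp [pvRows, h1, h2, h3, h4, h5, h6, h7, h8, h9]
  by_cases h10 : cc ≤ 5400
  · have hb : pvBisect cc 0 14 = 9 := by
        rw [pvBisect_step _ _ _ (by omega)]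
        rw [if_pos (show pvLimits.getD _ 0 < cc by norm_num [pvLimits]; omega)]
        rw [pvBisect_step _ _ _ (by omega)]
        rw [if_neg (show ¬ pvLimits.getD _ 0 < cc by norm_num [pvLimits]; omega)]
        rw [pvBisect_step _ _ _ (by omega)]
        rw [if_neg (show ¬ pvLimits.getD _ 0 < cc by norm_num [pvLimits]; omega)]
        rw [pvBisect_step _ _ _ (by omega)]
        rw [if_pos (show pvLimits.getD _ 0 < cc by norm_num [pvLimits]; omega)]
        exact pvBisect_stop cc _
    simp only [get_gasoline_tax_and_fuel, get_gasoline_tax_and_fuel_alt,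
        show pvLimits.length = 14 from rfl, hb]
    simp [pvRows, h1, h2, h3, h4, h5, h6, h7, h8, h9, h10]
  by_cases h11 : cc ≤ 6000
  · have hb : pvBisect cc 0 14 = 10 := by
        rw [pvBisect_step _ _ _ (by omega)]
        rw [if_pos (show pvLimits.getD _ 0 < cc by norm_num [pvLimits]; omega)]
        rw [pvBisect_step _ _ _ (by omega)]
        rw [if_neg (show ¬ pvLimits.getD _ 0 < cc by norm_num [pvLimits]; omega)]
        rw [pvBisect_step _ _ _ (by omega)]
        rw [if_pos (show pvLimits.getD _ 0 < cc by norm_num [pvLimits]; omega)]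
        rw [pvBisect_step _ _ _ (by omega)]
        rw [if_neg (show ¬ pvLimits.getD _ 0 < cc by norm_num [pvLimits]; omega)]
        exact pvBisect_stop cc _
    simp only [get_gasoline_tax_and_fuel, get_gasoline_tax_and_fuel_alt,
        show pvLimits.length = 14 from rfl, hb]
    simp [pvRows, h1, h2, h3, h4, h5, h6, h7, h8, h9, h10, h11]
  by_cases h12 : cc ≤ 6600
  · have hb : pvBisect cc 0 14 = 11 := by
        rw [pvBisect_step _ _ _ (by omega)]
        rw [if_pos (show pvLimits.getD _ 0 < cc by norm_num [pvLimits]; omega)]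
        rw [pvBisect_step _ _ _ (by omega)]
        rw [if_neg (show ¬ pvLimits.getD _ 0 < cc by norm_num [pvLimits]; omega)]
        rw [pvBisect_step _ _ _ (by omega)]
        rw [if_pos (show pvLimits.getD _ 0 < cc by norm_num [pvLimits]; omega)]
        rw [pvBisect_step _ _ _ (by omega)]
        rw [if_pos (show pvLimits.getD _ 0 < cc by norm_num [pvLimits]; omega)]
        exact pvBisect_stop cc _
    simp only [get_gasoline_tax_and_fuel, get_gasoline_tax_and_fuel_alt,
        show pvLimits.length = 14 from rfl, hb]
    simp [pvRows, h1, h2, h3, h4, h5, h6, h7, h8, h9, h10, h11, h12]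
  by_cases h13 : cc ≤ 7200
  · have hb : pvBisect cc 0 14 = 12 := by
        rw [pvBisect_step _ _ _ (by omega)]
        rw [if_pos (show pvLimits.getD _ 0 < cc by norm_num [pvLimits]; omega)]
        rw [pvBisect_step _ _ _ (by omega)]
        rw [if_pos (show pvLimits.getD _ 0 < cc by norm_num [pvLimits]; omega)]
        rw [pvBisect_step _ _ _ (by omega)]
        rw [if_neg (show ¬ pvLimits.getD _ 0 < cc by norm_num [pvLimits]; omega)]
        rw [pvBisect_step _ _ _ (by omega)]
        rw [if_neg (show ¬ pvLimits.getD _ 0 < cc by norm_num [pvLimits]; omega)]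
        exact pvBisect_stop cc _
    simp only [get_gasoline_tax_and_fuel, get_gasoline_tax_and_fuel_alt,
        show pvLimits.length = 14 from rfl, hb]
    simp [pvRows, h1, h2, h3, h4, h5, h6, h7, h8, h9, h10, h11, h12, h13]
  by_cases h14 : cc ≤ 7800
  · have hb : pvBisect cc 0 14 = 13 := by
        rw [pvBisect_step _ _ _ (by omega)]
        rw [if_pos (show pvLimits.getD _ 0 < cc by norm_num [pvLimits]; omega)]
        rw [pvBisect_step _ _ _ (by omega)]
        rw [if_pos (show pvLimits.getD _ 0 < cc by norm_num [pvLimits]; omega)]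
        rw [pvBisect_step _ _ _ (by omega)]
        rw [if_neg (show ¬ pvLimits.getD _ 0 < cc by norm_num [pvLimits]; omega)]
        rw [pvBisect_step _ _ _ (by omega)]
        rw [if_pos (show pvLimits.getD _ 0 < cc by norm_num [pvLimits]; omega)]
        exact pvBisect_stop cc _
    simp only [get_gasoline_tax_and_fuel, get_gasoline_tax_and_fuel_alt,
        show pvLimits.length = 14 from rfl, hb]
    simp [pvRows, h1, h2, h3, h4, h5, h6, h7, h8, h9, h10, h11, h12, h13, h14]
  · have hb : pvBisect cc 0 14 = 14 := by
        rw [pvBisect_step _ _ _ (by omega)]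
        rw [if_pos (show pvLimits.getD _ 0 < cc by norm_num [pvLimits]; omega)]
        rw [pvBisect_step _ _ _ (by omega)]
        rw [if_pos (show pvLimits.getD _ 0 < cc by norm_num [pvLimits]; omega)]
        rw [pvBisect_step _ _ _ (by omega)]
        rw [if_pos (show pvLimits.getD _ 0 < cc by norm_num [pvLimits]; omega)]
        exact pvBisect_stop cc _
    simp only [get_gasoline_tax_and_fuel, get_gasoline_tax_and_fuel_alt,
        show pvLimits.length = 14 from rfl, hb]
    simp [pvRows, h1, h2, h3, h4, h5, h6, h7, h8, h9, h10, h11, h12, h13, h14]
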